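-- pv_equiv track=rewrite | github.com/empirehazeclaw/empirehazeclaw | archive/orphaned_scripts/generate_docs.py | get_script_category
-- ===== SOURCE A (Python) =====
-- def get_script_category(filename):
--     """Determine category based on filename."""
--     name = filename.lower()
--
--     if any(x in name for x in ['social', 'twitter', 'tiktok', 'trend', 'viral', 'engagement']):
--         return "Social Media"
--     elif any(x in name for x in ['pod', 'etsy', 'printify', 'product']):
--         return "POD/E-Commerce"
--     elif any(x in name for x in ['trading', 'crypto', 'forex', 'portfolio']):
--         return "Trading"
--     elif any(x in name for x in ['backup', 'restore']):
--         return "Backup"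
--     elif any(x in name for x in ['health', 'monitor', 'stats', 'dashboard']):
--         return "Monitoring"
--     elif any(x in name for x in ['security', 'shield', 'sanitizer']):
--         return "Security"
--     elif any(x in name for x in ['memory', 'knowledge', 'rag']):
--         return "Memory/Knowledge"
--     elif any(x in name for x in ['learning', 'optimizer', 'self_']):
--         return "Learning"
--     elif any(x in name for x in ['debug', 'repair', 'fix']):
--         return "Debugging"
--     elif any(x in name for x in ['test']):
--         return "Testing"
--     else:
--         return "Utilities"
-- ===== SOURCE B (Python) =====
-- # B: exhaustive flat keyword scoring + argmin by category priority,
-- # instead of A's short-circuiting if/elif chain of any() tests.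
-- KEYWORD_CATEGORY = [
--     ('social', 'Social Media'), ('twitter', 'Social Media'), ('tiktok', 'Social Media'),
--     ('trend', 'Social Media'), ('viral', 'Social Media'), ('engagement', 'Social Media'),
--     ('pod', 'POD/E-Commerce'), ('etsy', 'POD/E-Commerce'), ('printify', 'POD/E-Commerce'),
--     ('product', 'POD/E-Commerce'),
--     ('trading', 'Trading'), ('crypto', 'Trading'), ('forex', 'Trading'), ('portfolio', 'Trading'),
--     ('backup', 'Backup'), ('restore', 'Backup'),
--     ('health', 'Monitoring'), ('monitor', 'Monitoring'), ('stats', 'Monitoring'),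
--     ('dashboard', 'Monitoring'),
--     ('security', 'Security'), ('shield', 'Security'), ('sanitizer', 'Security'),
--     ('memory', 'Memory/Knowledge'), ('knowledge', 'Memory/Knowledge'), ('rag', 'Memory/Knowledge'),
--     ('learning', 'Learning'), ('optimizer', 'Learning'), ('self_', 'Learning'),
--     ('debug', 'Debugging'), ('repair', 'Debugging'), ('fix', 'Debugging'),
--     ('test', 'Testing'),
-- ]
--
-- PRIORITY = {
--     'Social Media': 0, 'POD/E-Commerce': 1, 'Trading': 2, 'Backup': 3, 'Monitoring': 4,
--     'Security': 5, 'Memory/Knowledge': 6, 'Learning': 7, 'Debugging': 8, 'Testing': 9,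
-- }
--
-- def get_script_category(filename):
--     """Determine category based on filename."""
--     name = filename.lower()
--     hits = {cat for kw, cat in KEYWORD_CATEGORY if kw in name}
--     if not hits:
--         return "Utilities"
--     return min(hits, key=lambda c: PRIORITY[c])
-- ===== Notes on version B (the rewrite author's own statement) =====
-- stated objective: alternative
-- what changed: Instead of a short-circuiting if/elif chain of any() tests per category, B scans a flat keyword->category table exhaustively, collects the set of all matching categories, and returns the one of minimum priority (argmin), 'Utilities' if none matched; correct because priorities mirror the chain order so the minimum-priority match is exactly the first branch A would take.
import Mathlib
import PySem

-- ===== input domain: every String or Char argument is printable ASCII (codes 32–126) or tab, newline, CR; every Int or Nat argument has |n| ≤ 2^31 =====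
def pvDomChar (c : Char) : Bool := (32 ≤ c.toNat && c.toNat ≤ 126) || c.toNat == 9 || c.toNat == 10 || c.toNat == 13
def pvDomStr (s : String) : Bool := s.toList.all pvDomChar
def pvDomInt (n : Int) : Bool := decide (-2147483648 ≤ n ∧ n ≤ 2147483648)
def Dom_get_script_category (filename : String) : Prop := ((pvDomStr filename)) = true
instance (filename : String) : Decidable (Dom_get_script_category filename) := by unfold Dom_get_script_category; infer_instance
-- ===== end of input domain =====

-- B replaces A's short-circuiting if/elif chain with an exhaustive flat keyword scan that
-- collects the set of matching categories and returns the minimum-priority one (alternative; same cost).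

-- ===== PORT A =====
def get_script_category (filename : String) : String :=
  let name := PySem.Str.lower filename
  if ["social", "twitter", "tiktok", "trend", "viral", "engagement"].any (fun x => PySem.Str.isIn x name) then
    "Social Media"
  else if ["pod", "etsy", "printify", "product"].any (fun x => PySem.Str.isIn x name) then
    "POD/E-Commerce"
  else if ["trading", "crypto", "forex", "portfolio"].any (fun x => PySem.Str.isIn x name) then
    "Trading"
  else if ["backup", "restore"].any (fun x => PySem.Str.isIn x name) then
    "Backup"
  else if ["health", "monitor", "stats", "dashboard"].any (fun x => PySem.Str.isIn x name) then
    "Monitoring"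
  else if ["security", "shield", "sanitizer"].any (fun x => PySem.Str.isIn x name) then
    "Security"
  else if ["memory", "knowledge", "rag"].any (fun x => PySem.Str.isIn x name) then
    "Memory/Knowledge"
  else if ["learning", "optimizer", "self_"].any (fun x => PySem.Str.isIn x name) then
    "Learning"
  else if ["debug", "repair", "fix"].any (fun x => PySem.Str.isIn x name) then
    "Debugging"
  else if ["test"].any (fun x => PySem.Str.isIn x name) then
    "Testing"
  else
    "Utilities"

-- ===== PORT B =====  (flat keyword→category table, exhaustive match set, argmin by priority)
def pvKeywordCategory : List (String × String) :=
  [ ("social", "Social Media"), ("twitter", "Social Media"), ("tiktok", "Social Media"),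
    ("trend", "Social Media"), ("viral", "Social Media"), ("engagement", "Social Media"),
    ("pod", "POD/E-Commerce"), ("etsy", "POD/E-Commerce"), ("printify", "POD/E-Commerce"),
    ("product", "POD/E-Commerce"),
    ("trading", "Trading"), ("crypto", "Trading"), ("forex", "Trading"), ("portfolio", "Trading"),
    ("backup", "Backup"), ("restore", "Backup"),
    ("health", "Monitoring"), ("monitor", "Monitoring"), ("stats", "Monitoring"),
    ("dashboard", "Monitoring"),
    ("security", "Security"), ("shield", "Security"), ("sanitizer", "Security"),
    ("memory", "Memory/Knowledge"), ("knowledge", "Memory/Knowledge"), ("rag", "Memory/Knowledge"),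
    ("learning", "Learning"), ("optimizer", "Learning"), ("self_", "Learning"),
    ("debug", "Debugging"), ("repair", "Debugging"), ("fix", "Debugging"),
    ("test", "Testing") ]

def pvPriority : PySem.Dict String Int :=
  PySem.Dict.ofList
  [ ("Social Media", 0), ("POD/E-Commerce", 1), ("Trading", 2), ("Backup", 3), ("Monitoring", 4),
    ("Security", 5), ("Memory/Knowledge", 6), ("Learning", 7), ("Debugging", 8), ("Testing", 9) ]

-- hits = {cat for kw, cat in KEYWORD_CATEGORY if kw in name} ; min with key injective on the set
def get_script_category_alt (filename : String) : String :=
  let name := PySem.Str.lower filename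
  let hits : PySem.Set String :=
    pvKeywordCategory.foldl
      (fun acc p => if PySem.Str.isIn p.1 name then PySem.Set.add acc p.2 else acc)
      PySem.Set.empty
  match PySem.List.min? hits (fun c => PySem.Dict.getD pvPriority c 0) with
  | none => "Utilities"
  | some c => c

-- ===== PRECONDITION & SPEC =====
def Spec_get_script_category (filename : String) (out : String) : Prop := out = get_script_category_alt filename
instance (filename : String) (out : String) : Decidable (Spec_get_script_category filename out) := by unfold Spec_get_script_category; infer_instance

-- ===== CLAIM =====
def Claim_equal_get_script_category : Prop := ∀ (filename : String), Dom_get_script_category filename → Spec_get_script_category filename (get_script_category filename)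

-- ===== LEMMAS AND PROOFS =====

-- proof-side helpers: the two-level category table and the first-match chain
def pvCats : List (String × List String) :=
  [ ("Social Media", ["social", "twitter", "tiktok", "trend", "viral", "engagement"]),
    ("POD/E-Commerce", ["pod", "etsy", "printify", "product"]),
    ("Trading", ["trading", "crypto", "forex", "portfolio"]),
    ("Backup", ["backup", "restore"]),
    ("Monitoring", ["health", "monitor", "stats", "dashboard"]),
    ("Security", ["security", "shield", "sanitizer"]),
    ("Memory/Knowledge", ["memory", "knowledge", "rag"]),
    ("Learning", ["learning", "optimizer", "self_"]),
    ("Debugging", ["debug", "repair", "fix"]),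
    ("Testing", ["test"]) ]

def pvChain (m : String → Bool) : List (String × List String) → String
  | [] => "Utilities"
  | (c, kws) :: rest => if kws.any m then c else pvChain m rest

-- once an element is already in the set, re-adding it does nothing
theorem pv_foldl_const_mem (m : String → Bool) (c : String) (kws : List String)
    (s : PySem.Set String) (hc : c ∈ s) :
    (kws.map (fun k => (k, c))).foldl
      (fun acc p => if m p.1 then PySem.Set.add acc p.2 else acc) s = s := by
  induction kws with
  | nil => rfl
  | cons k t ih =>
    simp only [List.map, List.foldl]
    by_cases hm : m k
    · have : PySem.Set.add s c = s := by
        simp [PySem.Set.add, PySem.Set.contains, hc]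
      simp [hm, this, ih]
    · simp [hm, ih]

-- one category's keyword block: adds the category iff some keyword matches
theorem pv_foldl_block (m : String → Bool) (c : String) (kws : List String)
    (s : PySem.Set String) (hc : c ∉ s) :
    (kws.map (fun k => (k, c))).foldl
      (fun acc p => if m p.1 then PySem.Set.add acc p.2 else acc) s
      = if kws.any m then s ++ [c] else s := by
  induction kws with
  | nil => rfl
  | cons k t ih =>
    simp only [List.map, List.foldl, List.any_cons]
    by_cases hm : m k
    · have hadd : PySem.Set.add s c = s ++ [c] := by
        simp [PySem.Set.add, PySem.Set.contains, hc]
      rw [if_pos hm, hadd]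
      have hconst := pv_foldl_const_mem m c t (s ++ [c]) (by simp)
      simp [hm, hconst]
    · simp [hm, ih]

-- the whole hits set is the ordered list of matched category names
theorem pv_hits_eq (m : String → Bool) (CATS : List (String × List String))
    (s : PySem.Set String)
    (h : ∀ c ∈ CATS.map Prod.fst, c ∉ s) (hnd : (CATS.map Prod.fst).Nodup) :
    (CATS.flatMap (fun c => c.2.map (fun k => (k, c.1)))).foldl
      (fun acc p => if m p.1 then PySem.Set.add acc p.2 else acc) s
      = s ++ (CATS.filter (fun c => c.2.any m)).map Prod.fst := by
  induction CATS generalizing s with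
  | nil => simp
  | cons hd t ih =>
    obtain ⟨c, kws⟩ := hd
    simp only [List.flatMap_cons, List.foldl_append]
    have hcs : c ∉ s := h c (by simp)
    rw [pv_foldl_block m c kws s hcs]
    by_cases hm : kws.any m
    · have hs' : ∀ d ∈ t.map Prod.fst, d ∉ s ++ [c] := by
        intro d hd hmem
        rcases List.mem_append.mp hmem with h1 | h1
        · exact h d (by simp [hd]) h1
        · simp at h1; subst h1
          simp only [List.map_cons, List.nodup_cons] at hnd
          exact hnd.1 hd
      have hrec := ih (s ++ [c]) hs' (by simp only [List.map_cons, List.nodup_cons] at hnd; exact hnd.2)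
      rw [if_pos hm, hrec, List.filter_cons, if_pos hm]
      simp
    · have hrec := ih s (fun d hd => h d (by simp [hd]))
        (by simp only [List.map_cons, List.nodup_cons] at hnd; exact hnd.2)
      rw [if_neg hm, hrec, List.filter_cons, if_neg hm]

-- min? of a list whose key is strictly increasing is its head
theorem pv_min?_sorted (l : List String) (key : String → Int)
    (h : l.Pairwise (fun a b => key a < key b)) :
    PySem.List.min? l key = l.head? := by
  cases l with
  | nil => simp [PySem.List.min?_eq_none_iff]
  | cons x t =>
    have hne : (x :: t) ≠ [] := by simp
    obtain ⟨v, hv⟩ : ∃ v, PySem.List.min? (x :: t) key = some v := by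
      cases hmin : PySem.List.min? (x :: t) key with
      | none => exact absurd ((PySem.List.min?_eq_none_iff _ _).mp hmin) hne
      | some v => exact ⟨v, rfl⟩
    have hmem := PySem.List.min?_mem hv
    have hmin := PySem.List.min?_isMin hv
    rcases List.mem_cons.mp hmem with h1 | h1
    · simp [hv, h1]
    · exfalso
      have hlt : key x < key v := (List.pairwise_cons.mp h).1 v h1
      have hle : key v ≤ key x := hmin x (by simp)
      omega
-- the chain is first-match over the filtered category list
theorem pv_chain_eq_head (m : String → Bool) (CATS : List (String × List String)) :
    pvChain m CATS =
      (match ((CATS.filter (fun c => c.2.any m)).map Prod.fst).head? with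
        | none => "Utilities"
        | some c => c) := by
  induction CATS with
  | nil => rfl
  | cons hd t ih =>
    obtain ⟨c, kws⟩ := hd
    by_cases hm : kws.any m
    · simp [pvChain, hm]
    · simp [pvChain, hm, ih]

-- priorities strictly increase along any matched sublist of the category names
theorem pv_hits_pairwise (m : String → Bool) :
    (((pvCats.filter (fun c => c.2.any m)).map Prod.fst).Pairwise
      (fun a b => PySem.Dict.getD pvPriority a 0 < PySem.Dict.getD pvPriority b 0)) := by
  have hsub : ((pvCats.filter (fun c => c.2.any m)).map Prod.fst).Sublist (pvCats.map Prod.fst) :=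
    List.Sublist.map Prod.fst List.filter_sublist
  refine List.Pairwise.sublist hsub ?_
  decide

-- ===== VERDICT =====
theorem get_script_category_spec : Claim_equal_get_script_category := by
  intro filename _
  unfold Spec_get_script_category
  show get_script_category filename = get_script_category_alt filename
  set m : String → Bool := fun k => PySem.Str.isIn k (PySem.Str.lower filename) with hm
  have hchain : get_script_category filename = pvChain m pvCats := rfl
  have halt : get_script_category_alt filename =
      (match PySem.List.min?
          ((pvCats.flatMap (fun c => c.2.map (fun k => (k, c.1)))).foldl
            (fun acc p => if m p.1 then PySem.Set.add acc p.2 else acc) PySem.Set.empty)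
          (fun c => PySem.Dict.getD pvPriority c 0) with
        | none => "Utilities"
        | some c => c) := rfl
  rw [hchain, halt,
    pv_hits_eq m pvCats PySem.Set.empty (by intro c _ h; simp [PySem.Set.empty] at h) (by decide)]
  simp only [PySem.Set.empty, List.nil_append]
  rw [pv_min?_sorted _ _ (pv_hits_pairwise m), pv_chain_eq_head m pvCats]
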